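-- pv_equiv track=rewrite | github.com/YY661/PolyMealPlan | mealplan_yy.py | make_meal_pools
-- ===== SOURCE A (Python) =====
-- MEALS = ("Breakfast", "Lunch", "Dinner")
--
-- EVERYDAY = {"Every Day", "Everyday"}
--
-- def make_meal_pools(records):
--     pools = {m: [] for m in MEALS}
--     for item, meta in records:
--         period = (meta.get("period_name") or "").strip()
--         if period in EVERYDAY:
--             for m in MEALS:
--                 pools[m].append((item, meta))
--         elif period in pools:
--             pools[period].append((item, meta))
--     return pools
-- ===== SOURCE B (Python) =====
-- MEALS = ("Breakfast", "Lunch", "Dinner")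
--
-- EVERYDAY = {"Every Day", "Everyday"}
--
-- def make_meal_pools(records):
--     records = list(records)
--     def period(meta):
--         return (meta.get("period_name") or "").strip()
--     return {m: [(item, meta) for item, meta in records
--                 if period(meta) == m or period(meta) in EVERYDAY]
--             for m in MEALS}
-- ===== Notes on version B (the rewrite author's own statement) =====
-- stated objective: alternative
-- what changed: Replaces A's single dispatching pass that mutates a dict of accumulators (with an every-day fan-out appending to all three) by a transposed dict comprehension: one filter pass over the records per meal, with no mutable pools at all.
import Mathlib
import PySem

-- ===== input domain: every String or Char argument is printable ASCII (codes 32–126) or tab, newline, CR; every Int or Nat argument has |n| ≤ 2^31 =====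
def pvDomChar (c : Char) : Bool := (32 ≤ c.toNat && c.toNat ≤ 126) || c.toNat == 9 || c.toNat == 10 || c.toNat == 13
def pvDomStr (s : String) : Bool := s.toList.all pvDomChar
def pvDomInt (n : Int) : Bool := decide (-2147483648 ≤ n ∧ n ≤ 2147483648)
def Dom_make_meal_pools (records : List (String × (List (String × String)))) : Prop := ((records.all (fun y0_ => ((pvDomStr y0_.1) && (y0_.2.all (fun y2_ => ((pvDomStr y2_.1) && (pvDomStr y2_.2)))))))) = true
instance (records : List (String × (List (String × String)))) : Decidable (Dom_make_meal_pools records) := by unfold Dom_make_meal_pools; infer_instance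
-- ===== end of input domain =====

-- B buckets records into meal pools by one filter pass per meal (a transposed dict
-- comprehension) instead of A's single dispatching pass mutating a dict of accumulators;
-- alternative decomposition, same O(n·|MEALS|) cost.

-- ===== PORT A =====
-- one step of A's `for item, meta in records` loop (named so the proofs can speak about it)
def pvStepA (pools : PySem.Dict String (List (String × (List (String × String)))))
    (r : String × (List (String × String))) :
    PySem.Dict String (List (String × (List (String × String)))) :=
  let period := PySem.Str.strip (((PySem.Dict.mk r.2).get? "period_name").getD "")
  if PySem.Set.contains (PySem.Set.ofList ["Every Day", "Everyday"]) period then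
    ["Breakfast", "Lunch", "Dinner"].foldl (fun d m => d.modify m [] (fun xs => xs ++ [r])) pools
  else if pools.contains period then
    pools.modify period [] (fun xs => xs ++ [r])
  else pools

def make_meal_pools (records : List (String × (List (String × String)))) :
    List (String × List (String × (List (String × String)))) :=
  let pools0 : PySem.Dict String (List (String × (List (String × String)))) :=
    ["Breakfast", "Lunch", "Dinner"].foldl (fun d m => d.insert m []) PySem.Dict.empty
  let pools := records.foldl pvStepA pools0
  pools.items

-- ===== PORT B =====
-- Source B's local helper `period(meta)`
def pvPeriodB (md : List (String × String)) : String :=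
  PySem.Str.strip (((PySem.Dict.mk md).get? "period_name").getD "")

def make_meal_pools_alt (records : List (String × (List (String × String)))) :
    List (String × List (String × (List (String × String)))) :=
  ["Breakfast", "Lunch", "Dinner"].map (fun m =>
    (m, records.filter (fun r =>
      pvPeriodB r.2 == m ||
      PySem.Set.contains (PySem.Set.ofList ["Every Day", "Everyday"]) (pvPeriodB r.2))))

-- ===== PRECONDITION & SPEC =====
def Spec_make_meal_pools (records : List (String × (List (String × String)))) (out : List (String × List (String × (List (String × String))))) : Prop := out = make_meal_pools_alt records
instance (records : List (String × (List (String × String)))) (out : List (String × List (String × (List (String × String))))) : Decidable (Spec_make_meal_pools records out) := by unfold Spec_make_meal_pools; infer_instance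

-- ===== CLAIM (what is proved, stated in full; the proofs are below) =====
def Claim_equal_make_meal_pools : Prop := ∀ (records : List (String × (List (String × String)))), Dom_make_meal_pools records → Spec_make_meal_pools records (make_meal_pools records)

-- ===== LEMMAS AND PROOFS =====

-- B's membership predicate for meal m
def pvPredB (m : String) (r : String × (List (String × String))) : Bool :=
  pvPeriodB r.2 == m ||
  PySem.Set.contains (PySem.Set.ofList ["Every Day", "Everyday"]) (pvPeriodB r.2)

-- the shape of A's dict throughout the loop
def pvMk3 (b l d : List (String × (List (String × String)))) :
    PySem.Dict String (List (String × (List (String × String)))) :=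
  PySem.Dict.mk [("Breakfast", b), ("Lunch", l), ("Dinner", d)]

lemma pvStepA_mk3 (b l d : List (String × (List (String × String))))
    (r : String × (List (String × String))) :
    pvStepA (pvMk3 b l d) r =
      pvMk3 (b ++ if pvPredB "Breakfast" r then [r] else [])
            (l ++ if pvPredB "Lunch" r then [r] else [])
            (d ++ if pvPredB "Dinner" r then [r] else []) := by
  unfold pvStepA pvPredB pvMk3 pvPeriodB
  set p := PySem.Str.strip (((PySem.Dict.mk r.2).get? "period_name").getD "") with hp
  by_cases h1 : p = "Every Day"
  · simp [h1, PySem.Set.contains, PySem.Dict.modify, PySem.Dict.insert, PySem.Dict.getD,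
      PySem.Dict.get?, PySem.Dict.contains]
  by_cases h2 : p = "Everyday"
  · simp [h2, PySem.Set.contains, PySem.Dict.modify, PySem.Dict.insert, PySem.Dict.getD,
      PySem.Dict.get?, PySem.Dict.contains]
  by_cases h3 : p = "Breakfast"
  · simp [h3, PySem.Set.contains, PySem.Dict.modify, PySem.Dict.insert, PySem.Dict.getD,
      PySem.Dict.get?, PySem.Dict.contains]
  by_cases h4 : p = "Lunch"
  · simp [h4, PySem.Set.contains, PySem.Dict.modify, PySem.Dict.insert, PySem.Dict.getD,
      PySem.Dict.get?, PySem.Dict.contains]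
  by_cases h5 : p = "Dinner"
  · simp [h5, PySem.Set.contains, PySem.Dict.modify, PySem.Dict.insert, PySem.Dict.getD,
      PySem.Dict.get?, PySem.Dict.contains]
  · simp [PySem.Set.contains, PySem.Dict.contains, h1, h2, h3, h4, h5,
      beq_iff_eq, List.any]
    rintro (h | h | h)
    · exact (h3 h.symm).elim
    · exact (h4 h.symm).elim
    · exact (h5 h.symm).elim

lemma pv_loop (recs : List (String × (List (String × String))))
    (b l d : List (String × (List (String × String)))) :
    recs.foldl pvStepA (pvMk3 b l d) =
      pvMk3 (b ++ recs.filter (pvPredB "Breakfast"))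
            (l ++ recs.filter (pvPredB "Lunch"))
            (d ++ recs.filter (pvPredB "Dinner")) := by
  induction recs generalizing b l d with
  | nil => simp
  | cons r recs ih =>
      rw [List.foldl_cons, pvStepA_mk3, ih]
      simp only [List.filter_cons]
      have aux : ∀ (xs : List (String × (List (String × String)))) (p : Bool)
          (ys : List (String × (List (String × String)))),
          (xs ++ if p then [r] else []) ++ ys = xs ++ if p then r :: ys else ys := by
        intro xs p ys; cases p <;> simp
      simp only [aux]

-- ===== VERDICT (by name: the statement is the Claim_ definition above) =====
theorem make_meal_pools_spec : Claim_equal_make_meal_pools := by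
  intro records _
  show make_meal_pools records = make_meal_pools_alt records
  have h0 : make_meal_pools records = (records.foldl pvStepA (pvMk3 [] [] [])).items := rfl
  rw [h0, pv_loop]
  rfl
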